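-- pv_equiv track=rewrite | github.com/yiyan023/Data-Structures | GCA/Character Cascade from String Array.py | solution
-- ===== SOURCE A (Python) =====
-- def solution(arr: list):
--     res = ""
--     max_len = max(len(word) for word in arr)
--     idx = 0
--
--     while idx < max_len:
--         for word in arr:
--             res += word[idx] if idx < len(word) else ""
--
--         idx += 1
--
--     return res
-- ===== SOURCE B (Python) =====
-- def solution(arr: list):
--     # Peel columns: take the first character of every surviving word, then
--     # drop exhausted words and advance; no per-cell bounds check or max().
--     words = [w for w in arr if w]
--     pieces = []
--     while words:
--         pieces.append(''.join(w[0] for w in words))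
--         words = [w[1:] for w in words if len(w) > 1]
--     return ''.join(pieces)
-- ===== Notes on version B (the rewrite author's own statement) =====
-- stated objective: alternative
-- what changed: B transposes by peeling: it repeatedly takes the first character of every surviving word and drops exhausted words, instead of A's max() plus per-cell bounds-checked indexing word[idx] for every word at every column.
import Mathlib
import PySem

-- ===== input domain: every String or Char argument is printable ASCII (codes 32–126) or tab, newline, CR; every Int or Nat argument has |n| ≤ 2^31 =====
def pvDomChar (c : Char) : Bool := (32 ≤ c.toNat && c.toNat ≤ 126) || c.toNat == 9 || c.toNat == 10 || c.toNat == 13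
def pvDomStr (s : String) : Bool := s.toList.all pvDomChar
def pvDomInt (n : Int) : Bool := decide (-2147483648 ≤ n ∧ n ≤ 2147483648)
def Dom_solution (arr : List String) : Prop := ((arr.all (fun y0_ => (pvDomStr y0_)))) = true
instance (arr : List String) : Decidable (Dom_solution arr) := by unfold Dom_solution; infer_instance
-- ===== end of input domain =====

-- B peels columns off the word list (first character of every surviving word, then drop exhausted
-- words) instead of A's max()-bounded index loop with a per-cell bounds check; equal on nonempty input.

-- ===== PORT A =====
-- res = ""; max_len = max(len(word) for word in arr)
-- while idx < max_len: for word in arr: res += word[idx] if idx < len(word) else ""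
def solution (arr : List String) : String :=
  match PySem.List.max? (arr.map (fun word => (PySem.Str.len word : Int))) (fun x => x) with
  | none => ""   -- unreachable under Pre_solution: Python's max() raises ValueError on an empty sequence
  | some max_len =>
      String.ofList ((PySem.List.pyRange 0 max_len 1).foldl (fun res idx =>
        arr.foldl (fun res word =>
          res ++ (if idx < (PySem.Str.len word : Int) then (PySem.Str.pyGet? word idx).toList else []))
          res) [])

-- ===== PORT B =====
-- [w[1:] for w in words if len(w) > 1]
def nextWords (words : List (List Char)) : List (List Char) :=
  (words.filter (fun w => decide (1 < w.length))).map (List.drop 1)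

theorem nextWords_cons (x : List Char) (t : List (List Char)) :
    nextWords (x :: t) = if 1 < x.length then x.drop 1 :: nextWords t else nextWords t := by
  by_cases hx : 1 < x.length <;> simp [nextWords, hx]

theorem nextWords_measure (L : List (List Char)) :
    ((nextWords L).map List.length).sum + (nextWords L).length ≤ (L.map List.length).sum := by
  induction L with
  | nil => simp [nextWords]
  | cons x t ih =>
    rw [nextWords_cons]
    by_cases hx : 1 < x.length <;> simp [hx] <;> omega

theorem nextWords_lt (words : List (List Char)) (h : ¬ words = []) :
    ((nextWords words).map List.length).sum + (nextWords words).length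
      < (words.map List.length).sum + words.length := by
  cases words with
  | nil => exact absurd rfl h
  | cons x t =>
    have := nextWords_measure (x :: t)
    simp only [List.length_cons] at *
    omega

-- the while loop of Source B: emit the column of first characters, continue with the shortened words
def peelCols (words : List (List Char)) : List Char :=
  if _h : words = [] then []
  else words.flatMap (fun w => w.take 1) ++ peelCols (nextWords words)
termination_by (words.map List.length).sum + words.length
decreasing_by exact nextWords_lt words _h

def solution_alt (arr : List String) : String :=
  String.ofList (peelCols ((arr.map String.toList).filter (fun w => !w.isEmpty)))

-- ===== PRECONDITION & SPEC =====
-- Pre_ excludes only the empty list, on which A's max() raises ValueError.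
def Pre_solution (arr : List String) : Prop := arr ≠ []
instance (arr : List String) : Decidable (Pre_solution arr) := by unfold Pre_solution; infer_instance
def pvWitness_solution : List String := ["ab", "c", ""]

def Spec_solution (arr : List String) (out : String) : Prop := out = solution_alt arr
instance (arr : List String) (out : String) : Decidable (Spec_solution arr out) := by unfold Spec_solution; infer_instance

-- ===== CLAIM (what is proved, stated in full; the proofs are below) =====
def Claim_equal_solution : Prop := ∀ (arr : List String), Dom_solution arr → Pre_solution arr → Spec_solution arr (solution arr)

-- ===== LEMMAS AND PROOFS =====

-- the i-th column: the i-th character of every word that has one, in order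
def col (L : List (List Char)) (i : Nat) : List Char := L.filterMap (fun w => w[i]?)

theorem col_cons (x : List Char) (t : List (List Char)) (i : Nat) :
    col (x :: t) i = x[i]?.toList ++ col t i := by
  cases hi : x[i]? <;> simp [col, hi]

theorem col_filter (L : List (List Char)) (i : Nat) :
    col (L.filter (fun w => !w.isEmpty)) i = col L i := by
  induction L with
  | nil => rfl
  | cons x t ih =>
    cases x with
    | nil => simpa [col, List.filter_cons] using ih
    | cons a b => simp [col_cons, ih]

theorem col_zero (L : List (List Char)) :
    L.flatMap (fun w => w.take 1) = col L 0 := by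
  induction L with
  | nil => rfl
  | cons x t ih => cases x <;> simp [col_cons, List.take_one, ← ih]

theorem col_next (L : List (List Char)) (i : Nat) :
    col (nextWords L) i = col L (i + 1) := by
  induction L with
  | nil => rfl
  | cons x t ih =>
    rw [nextWords_cons]
    by_cases hx : 1 < x.length
    · simp [hx, col_cons, ih]
    · have hnone : x[i + 1]? = none := List.getElem?_eq_none (by omega)
      simp [hx, col_cons, hnone, ih]

-- B computes the concatenation of the columns, for any m bounding every word length
theorem peelCols_eq (m : Nat) (L : List (List Char))
    (hlen : ∀ w ∈ L, w.length ≤ m) (hne : [] ∉ L) :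
    peelCols L = (List.range m).flatMap (col L) := by
  induction m generalizing L with
  | zero =>
    have hL : L = [] := by
      cases L with
      | nil => rfl
      | cons x t =>
        have hx0 := hlen x (by simp)
        have hx : x = [] := by
          cases x with
          | nil => rfl
          | cons a b => simp at hx0
        exact absurd (hx ▸ (List.mem_cons_self)) hne
    simp [hL, peelCols]
  | succ m ih =>
    have hn1 : ∀ w ∈ nextWords L, w.length ≤ m := by
      intro w hw
      simp only [nextWords, List.mem_map, List.mem_filter] at hw
      obtain ⟨v, ⟨hv, hv1⟩, rfl⟩ := hw
      have := hlen v hv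
      simp
      omega
    have hn2 : [] ∉ nextWords L := by
      intro hmem
      simp only [nextWords, List.mem_map, List.mem_filter] at hmem
      obtain ⟨v, ⟨hv, hv1⟩, hdrop⟩ := hmem
      simp at hv1
      have hlv := congrArg List.length hdrop
      simp at hlv
      omega
    cases L with
    | nil => simp [peelCols, col]
    | cons x t =>
      rw [peelCols, dif_neg (by simp : ¬ (x :: t) = []), ih _ hn1 hn2, col_zero,
        List.range_succ_eq_map]
      simp only [List.flatMap_cons, List.flatMap_map, Nat.succ_eq_add_one]
      congr 1
      exact List.flatMap_congr fun i _ => col_next (x :: t) i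

-- A's inner pass over arr appends exactly the idx-th column (for a Nat index k)
theorem inner_pass (arr : List String) (k : Nat) (res : List Char) :
    arr.foldl (fun res word =>
        res ++ (if (k : Int) < (PySem.Str.len word : Int) then (PySem.Str.pyGet? word ((k : Nat) : Int)).toList else []))
      res = res ++ col (arr.map String.toList) k := by
  induction arr generalizing res with
  | nil => simp [col]
  | cons w t ih =>
    rw [List.foldl_cons, ih, List.map_cons, col_cons]
    by_cases hk : k < w.toList.length
    · rw [if_pos (by simp only [PySem.Str.len_eq]; exact_mod_cast hk)]
      simp
    · have hnone : w.toList[k]? = none := List.getElem?_eq_none (by omega)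
      rw [if_neg (by simp only [PySem.Str.len_eq]; exact_mod_cast hk)]
      simp [hnone]

-- ===== VERDICT (by name: the statement is the Claim_ definition above) =====
theorem solution_spec : Claim_equal_solution := by
  intro arr _ hpre
  unfold Spec_solution
  unfold solution
  cases hmax : PySem.List.max? (arr.map (fun word => (PySem.Str.len word : Int))) (fun x => x) with
  | none =>
    exact absurd (List.map_eq_nil_iff.mp ((PySem.List.max?_eq_none_iff _ _).mp hmax)) hpre
  | some m =>
    have hmem := PySem.List.max?_mem hmax
    have hm0 : 0 ≤ m := by
      simp only [List.mem_map] at hmem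
      obtain ⟨w, _, rfl⟩ := hmem
      exact Int.natCast_nonneg _
    have hmax' := PySem.List.max?_isMax hmax
    have hbound : ∀ w ∈ arr.map String.toList, w.length ≤ m.toNat := by
      intro w hw
      simp only [List.mem_map] at hw
      obtain ⟨s, hs, rfl⟩ := hw
      have := hmax' ((PySem.Str.len s : Int)) (List.mem_map_of_mem hs)
      simp only [PySem.Str.len_eq] at this
      omega
    -- A's loops compute the concatenation of the columns
    have hthis : ∀ (ks : List Nat) (res : List Char), ks.foldl (fun (res : List Char) (k : Nat) =>
        arr.foldl (fun res word =>
          res ++ (if (k : Int) < (PySem.Str.len word : Int) then (PySem.Str.pyGet? word (k : Int)).toList else []))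
          res) res = res ++ ks.flatMap (col (arr.map String.toList)) := by
      intro ks
      induction ks with
      | nil => simp
      | cons k kt iht =>
        intro res
        rw [List.foldl_cons, inner_pass, iht, List.flatMap_cons, List.append_assoc]
    have hA : (PySem.List.pyRange 0 m 1).foldl (fun res idx =>
        arr.foldl (fun res word =>
          res ++ (if idx < (PySem.Str.len word : Int) then (PySem.Str.pyGet? word idx).toList else []))
          res) [] = (List.range m.toNat).flatMap (col (arr.map String.toList)) := by
      rw [PySem.List.pyRange_one, List.foldl_map]
      simp only [zero_add]
      simpa using hthis (List.range (m - 0).toNat) []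
    dsimp only
    rw [hA]
    unfold solution_alt
    rw [peelCols_eq m.toNat _
      (by intro w hw; exact hbound w (List.mem_of_mem_filter hw))
      (by intro hmem; simpa using List.of_mem_filter hmem)]
    congr 1
    exact (List.flatMap_congr (fun i _ => (col_filter (arr.map String.toList) i))).symm
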